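-- pv_equiv track=rewrite | github.com/murraycutforth/psaap-active-learning | src/batch_al_strategies/mutual_information_strategy_bmfal.py | assemble_current_proposals
-- ===== SOURCE A (Python) =====
-- def assemble_current_proposals(X_HF, X_LF, inds_HF, inds_LF):
--     """Assemble current proposals into X_HF and X_LF
--     """
--     current_proposals = []  # (Fidelity, x) for all data points selected for current batch
--     X_LF_candidates = []  # Elements from X_LF which have not been selected so far
--     X_LF_cand_ind_map = []  # The j-th element in this list tells us the index of the j-th candidate in X_HF
--     for i in range(len(X_LF)):
--         if i in list(set(inds_LF)):
--             current_proposals.append((0, X_LF[i]))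
--         else:
--             X_LF_candidates.append(X_LF[i])
--             X_LF_cand_ind_map.append(i)
--
--     X_HF_candidates = []
--     X_HF_cand_ind_map = []
--     for i in range(len(X_HF)):
--         if i in list(set(inds_HF)):
--             current_proposals.append((1, X_HF[i]))
--         else:
--             X_HF_candidates.append(X_HF[i])
--             X_HF_cand_ind_map.append(i)
--
--     return X_HF_candidates, X_HF_cand_ind_map, X_LF_candidates, X_LF_cand_ind_map, current_proposals
-- ===== SOURCE B (Python) =====
-- def assemble_current_proposals(X_HF, X_LF, inds_HF, inds_LF):
--     """Assemble current proposals into X_HF and X_LF.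
--
--     Segment-based construction: sort the in-range selected indices once, then
--     emit the candidate index ranges BETWEEN consecutive selected indices (a loop
--     over the k selected indices, not over every position, and no membership test).
--     """
--     def split(X, inds, tag):
--         n = len(X)
--         sel = sorted({i for i in inds if 0 <= i < n})
--         imap = []
--         prev = 0
--         for s in sel:
--             imap.extend(range(prev, s))
--             prev = s + 1
--         imap.extend(range(prev, n))
--         cands = [X[i] for i in imap]
--         props = [(tag, X[i]) for i in sel]
--         return props, cands, imap
--
--     pL, cL, mL = split(X_LF, inds_LF, 0)
--     pH, cH, mH = split(X_HF, inds_HF, 1)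
--     return cH, mH, cL, mL, pL + pH
-- ===== Notes on version B (the rewrite author's own statement) =====
-- stated objective: faster
-- what changed: Replaces A's scan of every position with a per-iteration rebuilt list(set(inds)) membership test by a segment construction: sort the in-range selected indices once, then emit the candidate index ranges between consecutive selected indices (loop over the k selected indices, no membership test).
import Mathlib
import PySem

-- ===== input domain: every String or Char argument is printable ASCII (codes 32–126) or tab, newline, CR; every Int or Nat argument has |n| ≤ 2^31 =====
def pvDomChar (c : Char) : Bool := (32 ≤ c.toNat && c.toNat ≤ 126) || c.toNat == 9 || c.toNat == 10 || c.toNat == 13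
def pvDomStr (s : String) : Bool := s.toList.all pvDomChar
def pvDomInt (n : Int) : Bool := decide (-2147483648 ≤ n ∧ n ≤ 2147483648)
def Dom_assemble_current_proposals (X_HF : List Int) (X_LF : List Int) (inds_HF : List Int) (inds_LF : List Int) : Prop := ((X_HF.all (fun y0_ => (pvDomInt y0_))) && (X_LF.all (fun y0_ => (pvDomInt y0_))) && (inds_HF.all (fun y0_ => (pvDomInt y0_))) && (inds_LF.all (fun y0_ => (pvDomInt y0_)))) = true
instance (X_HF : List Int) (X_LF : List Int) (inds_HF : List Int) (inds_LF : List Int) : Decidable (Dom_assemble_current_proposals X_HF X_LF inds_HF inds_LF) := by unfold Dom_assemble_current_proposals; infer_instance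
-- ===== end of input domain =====

-- B replaces A's per-position scan (which rebuilds list(set(inds)) inside every iteration) with a
-- sort-then-segment construction: candidate indices are emitted as whole ranges between the sorted
-- selected indices, with no membership test; measurably faster.


-- ===== PORT A =====
-- one 'for i in range(len(X)): if i in list(set(inds)): proposals.append((tag, X[i])) else: cands.append(X[i]); indmap.append(i)'
-- loop; A's two loops are this shape with (X_LF, inds_LF, 0) and (X_HF, inds_HF, 1)
def pvScanLoop (X : List Int) (inds : List Int) (tag : Int)
    (st : List (Int × Int) × List Int × List Int) : List (Int × Int) × List Int × List Int :=
  (PySem.List.pyRange 0 (X.length : Int) 1).foldl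
    (fun acc i =>
      if i ∈ PySem.Set.ofList inds then
        (acc.1 ++ [(tag, PySem.List.pyGetD X i 0)], acc.2.1, acc.2.2)
      else
        (acc.1, acc.2.1 ++ [PySem.List.pyGetD X i 0], acc.2.2 ++ [i]))
    st

def assemble_current_proposals (X_HF : List Int) (X_LF : List Int) (inds_HF : List Int) (inds_LF : List Int) : List Int × List Int × List Int × List Int × (List (Int × Int)) :=
  let s1 := pvScanLoop X_LF inds_LF 0 ([], [], [])   -- (current_proposals, X_LF_candidates, X_LF_cand_ind_map)
  let s2 := pvScanLoop X_HF inds_HF 1 (s1.1, [], []) -- continues appending to current_proposals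
  (s2.2.1, s2.2.2, s1.2.1, s1.2.2, s2.1)

-- ===== PORT B =====
-- Source B's 'for s in sel: imap.extend(range(prev, s)); prev = s + 1'
def pvSegLoop (sel : List Int) (st : List Int × Int) : List Int × Int :=
  sel.foldl (fun acc s => (acc.1 ++ PySem.List.pyRange acc.2 s 1, s + 1)) st

-- Source B's inner helper 'split(X, inds, tag)'
def pvSplit (X : List Int) (inds : List Int) (tag : Int) :
    List (Int × Int) × List Int × List Int :=
  let n : Int := (X.length : Int)
  let sel := PySem.List.sorted
    (PySem.Set.ofList (inds.filter (fun i => decide (0 ≤ i ∧ i < n)))) (fun x => x)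
  let st := pvSegLoop sel ([], 0)
  let imap := st.1 ++ PySem.List.pyRange st.2 n 1
  let cands := imap.map (fun i => PySem.List.pyGetD X i 0)
  let props := sel.map (fun i => (tag, PySem.List.pyGetD X i 0))
  (props, cands, imap)

def assemble_current_proposals_alt (X_HF : List Int) (X_LF : List Int) (inds_HF : List Int) (inds_LF : List Int) : List Int × List Int × List Int × List Int × (List (Int × Int)) :=
  let lf := pvSplit X_LF inds_LF 0
  let hf := pvSplit X_HF inds_HF 1
  (hf.2.1, hf.2.2, lf.2.1, lf.2.2, lf.1 ++ hf.1)

-- ===== PRECONDITION & SPEC =====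
def Spec_assemble_current_proposals (X_HF : List Int) (X_LF : List Int) (inds_HF : List Int) (inds_LF : List Int) (out : List Int × List Int × List Int × List Int × (List (Int × Int))) : Prop := out = assemble_current_proposals_alt X_HF X_LF inds_HF inds_LF
instance (X_HF : List Int) (X_LF : List Int) (inds_HF : List Int) (inds_LF : List Int) (out : List Int × List Int × List Int × List Int × (List (Int × Int))) : Decidable (Spec_assemble_current_proposals X_HF X_LF inds_HF inds_LF out) := by unfold Spec_assemble_current_proposals; infer_instance

-- ===== CLAIM (what is proved, stated in full; the proofs are below) =====
def Claim_equal_assemble_current_proposals : Prop := ∀ (X_HF : List Int) (X_LF : List Int) (inds_HF : List Int) (inds_LF : List Int), Dom_assemble_current_proposals X_HF X_LF inds_HF inds_LF → Spec_assemble_current_proposals X_HF X_LF inds_HF inds_LF (assemble_current_proposals X_HF X_LF inds_HF inds_LF)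

-- ===== LEMMAS AND PROOFS =====

-- A's loop shape, as filters/maps of the range
lemma pvFoldl_split (l : List Int) (p : Int → Prop) [DecidablePred p] (f : Int → Int × Int) (g : Int → Int)
    (pr : List (Int × Int)) (c m : List Int) :
    l.foldl (fun acc i => if p i then (acc.1 ++ [f i], acc.2.1, acc.2.2)
                          else (acc.1, acc.2.1 ++ [g i], acc.2.2 ++ [i])) (pr, c, m)
    = (pr ++ (l.filter (fun i => decide (p i))).map f,
       c ++ (l.filter (fun i => !decide (p i))).map g,
       m ++ l.filter (fun i => !decide (p i))) := by
  induction l generalizing pr c m with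
  | nil => simp
  | cons x t ih =>
    by_cases h : p x <;> simp [List.foldl_cons, h, ih]

-- sorted({i for i in inds if 0 <= i < n}) is the in-order filter of range(n) by membership
lemma pvSel_eq (inds : List Int) (n : Int) :
    PySem.List.sorted
      (PySem.Set.ofList (inds.filter (fun i => decide (0 ≤ i ∧ i < n)))) (fun x => x)
    = (PySem.List.pyRange 0 n 1).filter (fun i => decide (i ∈ PySem.Set.ofList inds)) := by
  apply PySem.List.sorted_eq_of_perm_of_pairwise_lt
  · rw [List.perm_ext_iff_of_nodup
      ((PySem.List.nodup_pyRange_one 0 n).filter _)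
      (PySem.Set.nodup_ofList _)]
    intro a
    simp [PySem.Set.mem_ofList, List.mem_filter, PySem.List.mem_pyRange_one]
    tauto
  · exact (PySem.List.pairwise_lt_pyRange_one 0 n).filter _

-- the segment loop emits exactly the complement of sel inside range(prev, n), in order
lemma pvSegLoop_eq (n : Int) (sel : List Int) (acc : List Int) (prev : Int)
    (hp : sel.Pairwise (· < ·))
    (hb : ∀ s ∈ sel, prev ≤ s ∧ s < n) :
    (pvSegLoop sel (acc, prev)).1 ++ PySem.List.pyRange (pvSegLoop sel (acc, prev)).2 n 1
    = acc ++ (PySem.List.pyRange prev n 1).filter (fun i => !decide (i ∈ sel)) := by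
  induction sel generalizing acc prev with
  | nil => simp [pvSegLoop]
  | cons s rest ih =>
    obtain ⟨hps, hn⟩ := hb s (by simp)
    have hrest : ∀ r ∈ rest, s + 1 ≤ r ∧ r < n := by
      intro r hr
      exact ⟨by have := (List.pairwise_cons.mp hp).1 r hr; omega, (hb r (by simp [hr])).2⟩
    have step : pvSegLoop (s :: rest) (acc, prev)
        = pvSegLoop rest (acc ++ PySem.List.pyRange prev s 1, s + 1) := by
      simp [pvSegLoop]
    rw [step, ih _ _ (List.pairwise_cons.mp hp).2 hrest]
    have hsplit : PySem.List.pyRange prev n 1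
        = PySem.List.pyRange prev s 1 ++ (s :: PySem.List.pyRange (s+1) n 1) := by
      rw [PySem.List.pyRange_one_append prev s n hps (by omega),
        PySem.List.pyRange_one_cons hn]
    rw [hsplit, List.filter_append]
    have h1 : (PySem.List.pyRange prev s 1).filter (fun i => !decide (i ∈ s :: rest))
        = PySem.List.pyRange prev s 1 := by
      apply List.filter_eq_self.mpr
      intro a ha
      have has : a < s := (PySem.List.mem_pyRange_one.mp ha).2
      simp only [Bool.not_eq_eq_eq_not, Bool.not_true, decide_eq_false_iff_not]
      intro hmem
      rcases List.mem_cons.mp hmem with h | h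
      · omega
      · have := (hrest a h).1; omega
    have h2 : (s :: PySem.List.pyRange (s+1) n 1).filter (fun i => !decide (i ∈ s :: rest))
        = (PySem.List.pyRange (s+1) n 1).filter (fun i => !decide (i ∈ rest)) := by
      rw [List.filter_cons, if_neg (by simp)]
      apply List.filter_congr
      intro a ha
      have hsa : s + 1 ≤ a := (PySem.List.mem_pyRange_one.mp ha).1
      congr 1
      simp only [List.mem_cons, decide_eq_decide]
      have : a ≠ s := by omega
      tauto
    rw [h1, h2, List.append_assoc]

-- membership in sel agrees with membership in set(inds) on range(n)
lemma pvFilter_sel (inds : List Int) (n : Int) :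
    (PySem.List.pyRange 0 n 1).filter
      (fun i => !decide (i ∈ (PySem.List.pyRange 0 n 1).filter (fun j => decide (j ∈ PySem.Set.ofList inds))))
    = (PySem.List.pyRange 0 n 1).filter (fun i => !decide (i ∈ PySem.Set.ofList inds)) := by
  apply List.filter_congr
  intro a ha
  simp [List.mem_filter, ha, PySem.Set.mem_ofList]

-- B's split = the filter/map form of A's loop
lemma pvSplit_eq (X : List Int) (inds : List Int) (tag : Int) :
    pvSplit X inds tag
    = (((PySem.List.pyRange 0 (X.length : Int) 1).filter
          (fun i => decide (i ∈ PySem.Set.ofList inds))).map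
            (fun i => (tag, PySem.List.pyGetD X i 0)),
       ((PySem.List.pyRange 0 (X.length : Int) 1).filter
          (fun i => !decide (i ∈ PySem.Set.ofList inds))).map
            (fun i => PySem.List.pyGetD X i 0),
       (PySem.List.pyRange 0 (X.length : Int) 1).filter
          (fun i => !decide (i ∈ PySem.Set.ofList inds))) := by
  unfold pvSplit
  simp only [pvSel_eq]
  have hb : ∀ s ∈ (PySem.List.pyRange 0 (X.length : Int) 1).filter
      (fun j => decide (j ∈ PySem.Set.ofList inds)), (0 : Int) ≤ s ∧ s < (X.length : Int) := by
    intro s hs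
    exact PySem.List.mem_pyRange_one.mp (List.mem_filter.mp hs).1
  have := pvSegLoop_eq (X.length : Int)
    ((PySem.List.pyRange 0 (X.length : Int) 1).filter (fun j => decide (j ∈ PySem.Set.ofList inds)))
    [] 0 ((PySem.List.pairwise_lt_pyRange_one 0 (X.length : Int)).filter _) hb
  rw [List.nil_append] at this
  rw [this, pvFilter_sel]

-- ===== VERDICT (by name: the statement is the Claim_ definition above) =====
theorem assemble_current_proposals_spec : Claim_equal_assemble_current_proposals := by
  intro X_HF X_LF inds_HF inds_LF _
  unfold Spec_assemble_current_proposals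
  simp only [assemble_current_proposals, assemble_current_proposals_alt, pvScanLoop,
    pvFoldl_split _ (fun i => i ∈ PySem.Set.ofList inds_LF)
      (fun i => ((0 : Int), PySem.List.pyGetD X_LF i 0)) (fun i => PySem.List.pyGetD X_LF i 0),
    pvFoldl_split _ (fun i => i ∈ PySem.Set.ofList inds_HF)
      (fun i => ((1 : Int), PySem.List.pyGetD X_HF i 0)) (fun i => PySem.List.pyGetD X_HF i 0),
    pvSplit_eq]
  simp
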